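-- pv_equiv track=rewrite | github.com/miliar/Code_Jam_Webscraper | solutions_python/Problem_181/579.py | recurbestword
-- ===== SOURCE A (Python) =====
-- def recurbestword(S):
--     if len(S)<=1:
--         return S
--     else:
--
--         maxChar=S[-1]
--         maxindex=len(S)-1
--         for i in range (len(S)-1,-1,-1):
--             if S[i]>maxChar:
--                 maxChar=S[i]
--                 maxindex=i
--
--         return (maxChar+recurbestword(S[:maxindex])+S[maxindex+1:])
-- ===== SOURCE B (Python) =====
-- def recurbestword(S):
--     front = []
--     back = []
--     best = None
--     for c in S:
--         if best is None or c >= best: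
--             best = c
--             front.append(c)
--         else:
--             back.append(c)
--     front.reverse()
--     return ''.join(front) + ''.join(back)
-- ===== Notes on version B (the rewrite author's own statement) =====
-- stated objective: faster
-- what changed: A recursively rescans the string for the rightmost maximum and recurses on the prefix (quadratic); B does one left-to-right pass that splits characters into running-maximum records (emitted in reverse) and all other characters (emitted in order).
import Mathlib
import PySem

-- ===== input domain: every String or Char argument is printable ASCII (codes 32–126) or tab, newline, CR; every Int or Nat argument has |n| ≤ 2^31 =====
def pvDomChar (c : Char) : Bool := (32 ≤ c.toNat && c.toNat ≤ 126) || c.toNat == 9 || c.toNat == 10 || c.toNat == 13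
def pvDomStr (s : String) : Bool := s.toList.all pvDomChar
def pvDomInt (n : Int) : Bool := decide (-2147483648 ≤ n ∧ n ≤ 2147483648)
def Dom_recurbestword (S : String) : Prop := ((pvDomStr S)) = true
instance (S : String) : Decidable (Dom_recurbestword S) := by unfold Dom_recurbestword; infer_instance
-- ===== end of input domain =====

-- B replaces A's quadratic recursion (rescan for the rightmost max, recurse on the prefix) by one
-- left-to-right pass that splits the characters into running-maximum records (emitted reversed) and
-- the rest (emitted in order); objective: faster.

-- ===== PORT A =====
-- the body of A's backward for-loop: 'if S[i]>maxChar: maxChar=S[i]; maxindex=i'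
def aStep (l : List Char) (st : Char × Int) (i : Int) : Char × Int :=
  match PySem.List.pyGet? l i with
  | some c => if st.1 < c then (c, i) else st
  | none => st

-- 'maxChar=S[-1]; maxindex=len(S)-1; for i in range(len(S)-1,-1,-1): …'
def aLoop (l : List Char) : Char × Int :=
  (PySem.List.pyRange ((l.length : Int) - 1) (-1) (-1)).foldl (aStep l)
    (PySem.List.pyGetD l (-1) ' ', (l.length : Int) - 1)

-- bound on the loop result, needed by the port's termination argument
lemma aLoop_bound_aux (l : List Char) :
    ∀ (xs : List Int) (st : Char × Int), 0 ≤ st.2 → st.2 ≤ (l.length : Int) - 1 →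
    (∀ i ∈ xs, 0 ≤ i ∧ i ≤ (l.length : Int) - 1) →
    0 ≤ (xs.foldl (aStep l) st).2 ∧ (xs.foldl (aStep l) st).2 ≤ (l.length : Int) - 1 := by
  intro xs
  induction xs with
  | nil => intro st h0 h1 _; exact ⟨h0, h1⟩
  | cons i xs ih =>
    intro st h0 h1 hm
    simp only [List.foldl_cons]
    have hi := hm i (by simp)
    have hstep : 0 ≤ (aStep l st i).2 ∧ (aStep l st i).2 ≤ (l.length : Int) - 1 := by
      unfold aStep
      cases PySem.List.pyGet? l i with
      | none => exact ⟨h0, h1⟩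
      | some c =>
        simp only
        split
        · exact hi
        · exact ⟨h0, h1⟩
    exact ih _ hstep.1 hstep.2 (fun j hj => hm j (by simp [hj]))

lemma aLoop_bound (l : List Char) (h : 1 ≤ l.length) :
    0 ≤ (aLoop l).2 ∧ (aLoop l).2 ≤ (l.length : Int) - 1 := by
  unfold aLoop
  apply aLoop_bound_aux l _ _ (by omega) (by omega)
  intro i hi
  have := (PySem.List.mem_pyRange_neg_one).1 hi
  omega

def recurbestwordAux (l : List Char) : List Char :=
  if l.length ≤ 1 then l
  else
    (aLoop l).1 ::
      (recurbestwordAux (PySem.List.slice l none (some (aLoop l).2)) ++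
        PySem.List.slice l (some ((aLoop l).2 + 1)) none)
termination_by l.length
decreasing_by
  rename_i h
  have hb := aLoop_bound l (by omega)
  have e := PySem.List.slice_to l hb.1
  rw [e]
  have : (aLoop l).2.toNat ≤ l.length - 1 := by omega
  simp only [List.length_take]
  omega

def recurbestword (S : String) : String := String.ofList (recurbestwordAux S.toList)

-- ===== PORT B =====
-- one pass: running maximum goes to 'front', everything else to 'back'
def bStep (st : Option Char × List Char × List Char) (c : Char) :
    Option Char × List Char × List Char :=
  match st.1 with
  | none => (some c, st.2.1 ++ [c], st.2.2)
  | some b => if b ≤ c then (some c, st.2.1 ++ [c], st.2.2) else (some b, st.2.1, st.2.2 ++ [c])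

def bAux (l : List Char) : List Char :=
  ((l.foldl bStep (none, [], [])).2.1).reverse ++ (l.foldl bStep (none, [], [])).2.2

def recurbestword_alt (S : String) : String := String.ofList (bAux S.toList)

-- ===== PRECONDITION & SPEC =====
def Spec_recurbestword (S : String) (out : String) : Prop := out = recurbestword_alt S
instance (S : String) (out : String) : Decidable (Spec_recurbestword S out) := by unfold Spec_recurbestword; infer_instance

-- ===== CLAIM (what is proved, stated in full; the proofs are below) =====
def Claim_equal_recurbestword : Prop := ∀ (S : String), Dom_recurbestword S → Spec_recurbestword S (recurbestword S)

-- ===== LEMMAS AND PROOFS =====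

-- the first component of B's fold is either the initial best or an element of the consumed list
lemma bfold_fst (p : List Char) : ∀ st : Option Char × List Char × List Char,
    (p.foldl bStep st).1 = st.1 ∨ ∃ b ∈ p, (p.foldl bStep st).1 = some b := by
  induction p with
  | nil => intro st; left; rfl
  | cons c p ih =>
    intro st
    simp only [List.foldl_cons]
    have hstep : (bStep st c).1 = st.1 ∨ (bStep st c).1 = some c := by
      unfold bStep
      cases st.1 with
      | none => right; rfl
      | some b =>
        simp only
        split
        · right; rfl
        · left; rfl
    rcases ih (bStep st c) with h | ⟨b, hb, h⟩
    · rcases hstep with h2 | h2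
      · left; rw [h, h2]
      · right; exact ⟨c, by simp, by rw [h, h2]⟩
    · right; exact ⟨b, by simp [hb], h⟩

-- once the best is m, strictly smaller characters all go to 'back'
lemma bfold_less (s : List Char) (m : Char) : ∀ f k, (∀ c ∈ s, c < m) →
    s.foldl bStep (some m, f, k) = (some m, f, k ++ s) := by
  induction s with
  | nil => intro f k _; simp
  | cons c s ih =>
    intro f k hs
    have hc : c < m := hs c (by simp)
    simp only [List.foldl_cons]
    have : bStep (some m, f, k) c = (some m, f, k ++ [c]) := by
      unfold bStep; simp [not_le.2 hc]
    rw [this, ih (f) (k ++ [c]) (fun x hx => hs x (by simp [hx]))]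
    simp

lemma bStep_none (f k : List Char) (c : Char) : bStep (none, f, k) c = (some c, f ++ [c], k) := rfl

lemma bStep_some (b : Char) (f k : List Char) (c : Char) :
    bStep (some b, f, k) c = if b ≤ c then (some c, f ++ [c], k) else (some b, f, k ++ [c]) := rfl

-- decomposition of B around a rightmost maximum
lemma bAux_split (p s : List Char) (m : Char)
    (hp : ∀ x ∈ p, x ≤ m) (hs : ∀ x ∈ s, x < m) :
    bAux (p ++ m :: s) = m :: (bAux p ++ s) := by
  obtain ⟨b0, f0, k0, hq⟩ : ∃ b0 f0 k0, p.foldl bStep (none, [], []) = (b0, f0, k0) :=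
    ⟨_, _, _, rfl⟩
  have hm : bStep (b0, f0, k0) m = (some m, f0 ++ [m], k0) := by
    rcases bfold_fst p (none, [], []) with h | ⟨b, hb, h⟩
    · rw [hq] at h
      simp only at h
      rw [h]
      exact bStep_none f0 k0 m
    · rw [hq] at h
      simp only at h
      rw [h, bStep_some]
      simp [hp b hb]
  have hall : (p ++ m :: s).foldl bStep (none, [], []) = (some m, f0 ++ [m], k0 ++ s) := by
    rw [List.foldl_append, hq, List.foldl_cons, hm, bfold_less s m _ _ hs]
  unfold bAux
  rw [hall, hq]
  simp

-- characterization of A's backward scan: it returns the rightmost maximum and its index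
lemma loopW (l : List Char) (hl : l ≠ []) (a : Nat) (h : a < l.length) :
    ∃ p m s, l.drop a = p ++ m :: s ∧ (∀ x ∈ p, x ≤ m) ∧ (∀ x ∈ s, x < m) ∧
      (PySem.List.pyRange (a : Int) (l.length : Int) 1).foldr (fun i st => aStep l st i)
        (PySem.List.pyGetD l (-1) ' ', (l.length : Int) - 1) = (m, (a : Int) + (p.length : Int)) := by
  have hcons : PySem.List.pyRange (a : Int) (l.length : Int) 1 =
      (a : Int) :: PySem.List.pyRange ((a : Int) + 1) (l.length : Int) 1 :=
    PySem.List.pyRange_one_cons (by exact_mod_cast h)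
  have hga : PySem.List.pyGet? l (a : Int) = some l[a] := PySem.List.pyGet?_ofNat l a h
  have hdrop : l.drop a = l[a] :: l.drop (a + 1) := List.drop_eq_getElem_cons h
  by_cases h2 : a + 1 < l.length
  · obtain ⟨p, m, s, hd, hp, hs, hf⟩ := loopW l hl (a + 1) h2
    have hcast : ((a + 1 : Nat) : Int) = (a : Int) + 1 := by push_cast; ring
    rw [hcast] at hf
    rw [hcons, List.foldr_cons, hf]
    by_cases hc : m < l[a]
    · refine ⟨[], l[a], p ++ m :: s, ?_, by simp, ?_, ?_⟩
      · rw [hdrop, hd]; simp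
      · intro x hx
        rcases List.mem_append.1 hx with hx | hx
        · exact lt_of_le_of_lt (hp x hx) hc
        · rcases List.mem_cons.1 hx with hx | hx
          · rw [hx]; exact hc
          · exact lt_trans (hs x hx) hc
      · simp [aStep, hga, hc]
    · refine ⟨l[a] :: p, m, s, ?_, ?_, hs, ?_⟩
      · rw [hdrop, hd]; simp
      · intro x hx
        rcases List.mem_cons.1 hx with hx | hx
        · rw [hx]; exact not_lt.1 hc
        · exact hp x hx
      · simp only [aStep, hga]
        rw [if_neg hc]
        simp only [List.length_cons]
        congr 1
        push_cast
        ring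
  · have ha : a = l.length - 1 := by omega
    have hnil : PySem.List.pyRange ((a : Int) + 1) (l.length : Int) 1 = [] :=
      PySem.List.pyRange_one_eq_nil (by omega)
    have hlast : PySem.List.pyGetD l (-1) ' ' = l.getLast hl := PySem.List.pyGetD_neg_one l ' ' hl
    have hge : l.getLast hl = l[a] := by
      rw [List.getLast_eq_getElem]
      congr 1
      omega
    refine ⟨[], l[a], [], ?_, by simp, by simp, ?_⟩
    · rw [hdrop]
      have : l.drop (a + 1) = [] := List.drop_eq_nil_of_le (by omega)
      rw [this]
      simp
    · rw [hcons, hnil]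
      simp only [List.foldr_cons, List.foldr_nil, aStep, hga, hlast, hge]
      rw [if_neg (lt_irrefl _)]
      simp only [List.length_nil]
      congr 1
      omega
termination_by l.length - a

lemma aLoop_eq (l : List Char) (hl : l ≠ []) :
    ∃ p m s, l = p ++ m :: s ∧ (∀ x ∈ p, x ≤ m) ∧ (∀ x ∈ s, x < m) ∧
      aLoop l = (m, (p.length : Int)) := by
  obtain ⟨p, m, s, hd, hp, hs, hf⟩ := loopW l hl 0 (by cases l with | nil => exact absurd rfl hl | cons c t => simp)
  refine ⟨p, m, s, by simpa using hd, hp, hs, ?_⟩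
  unfold aLoop
  have hr : PySem.List.pyRange ((l.length : Int) - 1) (-1) (-1) =
      (PySem.List.pyRange 0 (l.length : Int) 1).reverse := by
    rw [PySem.List.pyRange_neg_one_eq_reverse]; norm_num
  rw [hr, List.foldl_reverse]
  simpa using hf

lemma main_list (l : List Char) : recurbestwordAux l = bAux l := by
  by_cases h : l.length ≤ 1
  · rw [recurbestwordAux, if_pos h]
    match l, h with
    | [], _ => rfl
    | [c], _ => rfl
  · have hl : l ≠ [] := by intro hn; rw [hn] at h; simp at h
    obtain ⟨p, m, s, hd, hp, hs, hf⟩ := aLoop_eq l hl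
    rw [recurbestwordAux, if_neg h, hf]
    simp only
    have e1 : PySem.List.slice l none (some ((p.length : Nat) : Int)) = l.take p.length :=
      PySem.List.slice_to_natCast l p.length
    have hcast : ((p.length : Nat) : Int) + 1 = ((p.length + 1 : Nat) : Int) := by push_cast; ring
    have e2 : PySem.List.slice l (some ((p.length + 1 : Nat) : Int)) = l.drop (p.length + 1) :=
      PySem.List.slice_from_natCast l (p.length + 1)
    rw [e1, hcast, e2]
    have ht : l.take p.length = p := by rw [hd]; exact List.take_left
    have hdr : l.drop (p.length + 1) = s := by
      rw [hd, List.drop_append]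
      simp
    rw [ht, hdr, main_list p, hd, bAux_split p s m hp hs]
termination_by l.length
decreasing_by
  rw [hd]
  simp
-- ===== VERDICT (by name: the statement is the Claim_ definition above) =====
theorem recurbestword_spec : Claim_equal_recurbestword := by
  intro S _
  unfold Spec_recurbestword recurbestword recurbestword_alt
  rw [main_list]
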